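-- pv_equiv track=rewrite | github.com/AileenXie/leetcode | written-examination/0901pdd2020/01.py | fill_matrix
-- ===== SOURCE A (Python) =====
-- def fill_matrix(flag, m, a, b):
--     sub_matrix = [[0 for _ in range(m)] for _ in range(m)]
--     if flag:  # 1-\ 0-/
--         for i in range(m):
--             for j in range(m):
--                 if i>j:
--                     sub_matrix[i][j]=a
--                 elif i<j:
--                     sub_matrix[i][j]=b
--     else:
--         base = m-1
--         for i in range(m):
--             for j in range(m):
--                 if i+j<base:
--                     sub_matrix[i][j] = a
--                 elif i+j>base:
--                     sub_matrix[i][j] = b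
--     return sub_matrix
-- ===== SOURCE B (Python) =====
-- def fill_matrix(flag, m, a, b):
--     if flag:
--         return [[a] * i + [0] + [b] * (m - 1 - i) for i in range(m)]
--     else:
--         return [[a] * (m - 1 - i) + [0] + [b] * i for i in range(m)]
-- ===== Notes on version B (the rewrite author's own statement) =====
-- stated objective: simpler
-- what changed: Each row is built directly as a concatenation of homogeneous segments ([a]*k + [0] + [b]*(m-1-k)) computed from arithmetic segment lengths, replacing the zero-matrix initialisation, the inner column loop and the per-cell if/elif ladder.
import Mathlib
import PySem

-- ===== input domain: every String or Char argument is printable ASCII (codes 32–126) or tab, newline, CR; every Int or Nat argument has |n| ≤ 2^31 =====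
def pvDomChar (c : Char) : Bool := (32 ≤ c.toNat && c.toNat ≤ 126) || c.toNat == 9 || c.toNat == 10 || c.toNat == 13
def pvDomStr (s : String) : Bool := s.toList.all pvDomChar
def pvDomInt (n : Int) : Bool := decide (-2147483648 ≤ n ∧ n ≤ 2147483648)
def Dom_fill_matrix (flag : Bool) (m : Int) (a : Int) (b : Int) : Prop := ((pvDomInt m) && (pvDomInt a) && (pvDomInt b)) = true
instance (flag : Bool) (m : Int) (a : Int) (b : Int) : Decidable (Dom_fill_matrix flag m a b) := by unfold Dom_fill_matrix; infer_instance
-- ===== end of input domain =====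

-- B builds each row directly as a concatenation of homogeneous segments instead of
-- looping over columns of a zero matrix with an if/elif ladder (objective: simpler).

-- ===== PORT A =====
-- A's nested for-loops over range(m) fill each cell of the zero-initialised matrix;
-- ported as nested maps over the same ranges, with the same branch order per cell
-- (the final 'else' keeps the initial 0 of the untouched diagonal cell).
def fill_matrix (flag : Bool) (m : Int) (a : Int) (b : Int) : List (List Int) :=
  if flag then
    (PySem.List.pyRange 0 m 1).map (fun i =>
      (PySem.List.pyRange 0 m 1).map (fun j =>
        if i > j then a else if i < j then b else 0))
  else
    let base := m - 1
    (PySem.List.pyRange 0 m 1).map (fun i =>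
      (PySem.List.pyRange 0 m 1).map (fun j =>
        if i + j < base then a else if i + j > base then b else 0))

-- ===== PORT B =====
def fill_matrix_alt (flag : Bool) (m : Int) (a : Int) (b : Int) : List (List Int) :=
  if flag then
    (PySem.List.pyRange 0 m 1).map (fun i =>
      List.replicate i.toNat a ++ [0] ++ List.replicate (m - 1 - i).toNat b)
  else
    (PySem.List.pyRange 0 m 1).map (fun i =>
      List.replicate (m - 1 - i).toNat a ++ [0] ++ List.replicate i.toNat b)

-- ===== PRECONDITION & SPEC =====
def Spec_fill_matrix (flag : Bool) (m : Int) (a : Int) (b : Int) (out : List (List Int)) : Prop := out = fill_matrix_alt flag m a b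
instance (flag : Bool) (m : Int) (a : Int) (b : Int) (out : List (List Int)) : Decidable (Spec_fill_matrix flag m a b out) := by unfold Spec_fill_matrix; infer_instance

-- ===== CLAIM (what is proved, stated in full; the proofs are below) =====
def Claim_equal_fill_matrix : Prop := ∀ (flag : Bool) (m : Int) (a : Int) (b : Int), Dom_fill_matrix flag m a b → Spec_fill_matrix flag m a b (fill_matrix flag m a b)

-- ===== LEMMAS AND PROOFS =====

-- A map over an integer range whose body is constant is a replicate.
theorem map_pyRange_const (lo hi c : Int) (f : Int → Int)
    (h : ∀ j, lo ≤ j → j < hi → f j = c) :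
    (PySem.List.pyRange lo hi 1).map f = List.replicate (hi - lo).toNat c := by
  have h1 : (PySem.List.pyRange lo hi 1).map f
      = (PySem.List.pyRange lo hi 1).map (fun _ => c) := by
    apply List.map_congr_left
    intro j hj
    rw [PySem.List.mem_pyRange_one] at hj
    exact h j hj.1 hj.2
  rw [h1, List.map_const', PySem.List.length_pyRange_one]

-- Row i of A (flag = true) is the segment concatenation B builds.
theorem rowA_true (m a b i : Int) (h0 : 0 ≤ i) (h1 : i < m) :
    (PySem.List.pyRange 0 m 1).map (fun j => if i > j then a else if i < j then b else 0)
      = List.replicate i.toNat a ++ [0] ++ List.replicate (m - 1 - i).toNat b := by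
  have e1 := map_pyRange_const 0 i a (fun j => if i > j then a else if i < j then b else 0)
    (by intro j hj1 hj2; simp [show i > j by omega])
  have e3 := map_pyRange_const (i + 1) m b (fun j => if i > j then a else if i < j then b else 0)
    (by intro j hj1 hj2; simp [show ¬ i > j by omega, show i < j by omega])
  rw [PySem.List.pyRange_one_append 0 i m h0 (le_of_lt h1),
      PySem.List.pyRange_one_append i (i + 1) m (by omega) (by omega),
      PySem.List.pyRange_one_singleton]
  simp only [List.map_append, e1, e3]
  have e : (m - (i + 1)).toNat = (m - 1 - i).toNat := by omega
  simp [List.append_assoc, e]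

-- Row i of A (flag = false) is the segment concatenation B builds.
theorem rowA_false (m a b i : Int) (h0 : 0 ≤ i) (h1 : i < m) :
    (PySem.List.pyRange 0 m 1).map (fun j => if i + j < m - 1 then a else if i + j > m - 1 then b else 0)
      = List.replicate (m - 1 - i).toNat a ++ [0] ++ List.replicate i.toNat b := by
  have e1 := map_pyRange_const 0 (m - 1 - i) a
    (fun j => if i + j < m - 1 then a else if i + j > m - 1 then b else 0)
    (by intro j hj1 hj2; simp [show i + j < m - 1 by omega])
  have e3 := map_pyRange_const ((m - 1 - i) + 1) m b
    (fun j => if i + j < m - 1 then a else if i + j > m - 1 then b else 0)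
    (by intro j hj1 hj2; simp [show ¬ i + j < m - 1 by omega, show i + j > m - 1 by omega])
  rw [PySem.List.pyRange_one_append 0 (m - 1 - i) m (by omega) (by omega),
      PySem.List.pyRange_one_append (m - 1 - i) ((m - 1 - i) + 1) m (by omega) (by omega),
      PySem.List.pyRange_one_singleton]
  simp only [List.map_append, e1, e3]
  have e : (m - ((m - 1 - i) + 1)).toNat = i.toNat := by omega
  simp [List.append_assoc, e, show ¬ i + (m - 1 - i) < m - 1 by omega,
        show ¬ i + (m - 1 - i) > m - 1 by omega]

-- ===== VERDICT (by name: the statement is the Claim_ definition above) =====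
theorem fill_matrix_spec : Claim_equal_fill_matrix := by
  intro flag m a b _
  unfold Spec_fill_matrix fill_matrix fill_matrix_alt
  cases flag <;> simp only [if_true, if_false, Bool.false_eq_true]
  · apply List.map_congr_left
    intro i hi
    rw [PySem.List.mem_pyRange_one] at hi
    exact rowA_false m a b i hi.1 hi.2
  · apply List.map_congr_left
    intro i hi
    rw [PySem.List.mem_pyRange_one] at hi
    exact rowA_true m a b i hi.1 hi.2
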